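-- pv_equiv track=rewrite | github.com/Ailurus-2233/leetcode | 笔试/ms/q1.py | func
-- ===== SOURCE A (Python) =====
-- def func(s: str):
--     '''
--     最长子串，其中字串中的字符出现次数为偶数次
--     '''
--     n = len(s)
--     pos = [-1 for x in range(1 << 26)]
--     ans = 0
--     status = 0
--     pos[0] = 0
--     for i in range(n):
--         ch = ord(s[i]) - ord('a')
--         status ^= 1 << ch
--         if pos[status] != -1:
--             ans = max(ans, i + 1 - pos[status])
--         else:
--             pos[status] = i + 1
--     return ans
-- ===== SOURCE B (Python) =====
-- def func(s: str):
--     n = len(s)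
--     ans = 0
--     for i in range(n):
--         mask = 0
--         for j in range(i, n):
--             mask ^= 1 << (ord(s[j]) - ord('a'))
--             if mask == 0:
--                 ans = max(ans, j - i + 1)
--     return ans
-- ===== Notes on version B (the rewrite author's own statement) =====
-- stated objective: simpler
-- what changed: Replaced A's single pass with a 2^26-entry first-occurrence prefix-parity table by a plain brute force over all substrings with a running XOR parity mask, taking the max length whose mask is zero.
import Mathlib
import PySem

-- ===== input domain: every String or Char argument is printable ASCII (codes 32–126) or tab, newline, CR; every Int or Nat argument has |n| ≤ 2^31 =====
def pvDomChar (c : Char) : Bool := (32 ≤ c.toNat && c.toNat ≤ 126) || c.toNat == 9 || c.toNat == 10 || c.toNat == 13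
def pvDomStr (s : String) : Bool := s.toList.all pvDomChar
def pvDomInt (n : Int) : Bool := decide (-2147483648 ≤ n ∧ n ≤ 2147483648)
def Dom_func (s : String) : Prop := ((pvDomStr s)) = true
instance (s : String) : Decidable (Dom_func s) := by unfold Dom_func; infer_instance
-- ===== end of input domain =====

-- B replaces A's 2^26 first-occurrence table and single pass by a plain O(n^2) brute force
-- over all substrings with a running parity mask; simpler and without the huge allocation.

-- ===== PORT A =====
-- A's 2^26-entry array `pos` is modelled as a total function Nat → Int (exact inside
-- Pre_func, where every status index is below 2^26 so no IndexError occurs).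
def funcGo : List Char → (Nat → Int) → Int → Nat → Nat → Int
  | [], _, ans, _, _ => ans
  | c :: rest, pos, ans, status, i =>
    let ch := c.toNat - 97          -- ord(s[i]) - ord of the first lowercase letter; exact under Pre_func
    let status' := status ^^^ (1 <<< ch)
    if pos status' ≠ -1 then
      funcGo rest pos (max ans (((i : Int) + 1) - pos status')) status' (i + 1)
    else
      funcGo rest (fun m => if m = status' then ((i : Int) + 1) else pos m) ans status' (i + 1)

def func (s : String) : Int :=
  funcGo s.toList (fun m => if m = 0 then 0 else -1) 0 0 0

-- ===== PORT B =====
def funcAltInner : List Char → Nat → Int → Int → Int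
  | [], _, _, ans => ans
  | c :: rest, mask, k, ans =>
    let mask' := mask ^^^ (1 <<< (c.toNat - 97))
    funcAltInner rest mask' (k + 1) (if mask' = 0 then max ans (k + 1) else ans)

def funcAltOuter : List Char → Int → Int
  | [], ans => ans
  | c :: rest, ans => funcAltOuter rest (funcAltInner (c :: rest) 0 0 ans)

def func_alt (s : String) : Int := funcAltOuter s.toList 0

-- ===== PRECONDITION & SPEC =====
-- Pre_func: exactly the inputs where Python A returns: every character is a lowercase
-- letter (code 97..122).  Otherwise A raises (ValueError on a negative shift for codes
-- below 97, IndexError on the 2^26 array for codes above 122).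
def Pre_func (s : String) : Prop :=
  (s.toList.all (fun c => 97 ≤ c.toNat && c.toNat ≤ 122)) = true
instance (s : String) : Decidable (Pre_func s) := by unfold Pre_func; infer_instance
def pvWitness_func : String := "aabcb"

def Spec_func (s : String) (out : Int) : Prop := out = func_alt s
instance (s : String) (out : Int) : Decidable (Spec_func s out) := by unfold Spec_func; infer_instance

-- ===== CLAIM (what is proved, stated in full; the proofs are below) =====
def Claim_equal_func : Prop := ∀ (s : String), Dom_func s → Pre_func s → Spec_func s (func s)

-- ===== LEMMAS AND PROOFS =====

-- parity mask of a list of characters (xor of the per-character bits)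
def pmask (l : List Char) : Nat := l.foldl (fun m c => m ^^^ (1 <<< (c.toNat - 97))) 0

-- v is the length of a substring of the first i chars of L whose chars all occur evenly
def GoodUpTo (L : List Char) (i : Nat) (v : Int) : Prop :=
  ∃ a b : Nat, a < b ∧ b ≤ i ∧ pmask (L.take a) = pmask (L.take b) ∧ v = (b : Int) - (a : Int)

def MaxSpec (L : List Char) (r : Int) : Prop :=
  0 ≤ r ∧ (r = 0 ∨ GoodUpTo L L.length r) ∧ ∀ v, GoodUpTo L L.length v → v ≤ r

theorem isMax_unique (L : List Char) (r₁ r₂ : Int) (h₁ : MaxSpec L r₁) (h₂ : MaxSpec L r₂) :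
    r₁ = r₂ := by
  obtain ⟨n₁, m₁, u₁⟩ := h₁
  obtain ⟨n₂, m₂, u₂⟩ := h₂
  have l₁ : r₁ ≤ r₂ := by
    rcases m₁ with h | h
    · omega
    · exact u₂ _ h
  have l₂ : r₂ ≤ r₁ := by
    rcases m₂ with h | h
    · omega
    · exact u₁ _ h
  omega

theorem pmask_shift (l : List Char) (m : Nat) :
    l.foldl (fun m c => m ^^^ (1 <<< (c.toNat - 97))) m = m ^^^ pmask l := by
  induction l generalizing m with
  | nil => simp [pmask]
  | cons c r ih =>
    simp only [pmask, List.foldl_cons, Nat.zero_xor] at *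
    rw [ih, ih (1 <<< (c.toNat - 97)), Nat.xor_assoc]

theorem pmask_append (l₁ l₂ : List Char) : pmask (l₁ ++ l₂) = pmask l₁ ^^^ pmask l₂ := by
  simp only [pmask, List.foldl_append]
  rw [pmask_shift]
  rfl

theorem pmask_take_succ (L : List Char) (i : Nat) (h : i < L.length) :
    pmask (L.take (i + 1)) = pmask (L.take i) ^^^ (1 <<< ((L[i]).toNat - 97)) := by
  rw [List.take_succ, List.getElem?_eq_getElem h]
  simp only [Option.toList_some]
  rw [pmask_append]
  simp [pmask]

theorem xor_left_cancel (a b c : Nat) (h : a ^^^ b = a ^^^ c) : b = c := by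
  have := congrArg (fun z => a ^^^ z) h
  simpa [← Nat.xor_assoc, Nat.xor_self, Nat.zero_xor] using this

-- ---------- B side ----------

theorem inner_spec (rest : List Char) (mask : Nat) (k ans : Int) :
    ans ≤ funcAltInner rest mask k ans ∧
    (funcAltInner rest mask k ans = ans ∨
      ∃ j : Nat, j < rest.length ∧ mask ^^^ pmask (rest.take (j + 1)) = 0 ∧
        funcAltInner rest mask k ans = k + (j + 1)) ∧
    (∀ j : Nat, j < rest.length → mask ^^^ pmask (rest.take (j + 1)) = 0 →
      k + ((j : Int) + 1) ≤ funcAltInner rest mask k ans) := by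
  induction rest generalizing mask k ans with
  | nil => refine ⟨le_refl _, Or.inl rfl, ?_⟩; intro j hj; simp at hj
  | cons c r ih =>
    simp only [funcAltInner]
    set mask' := mask ^^^ (1 <<< (c.toNat - 97)) with hmask'
    set ans' := if mask' = 0 then max ans (k + 1) else ans with hans'
    obtain ⟨ihle, ihmem, ihub⟩ := ih mask' (k + 1) ans'
    have hansle : ans ≤ ans' := by
      rw [hans']; split <;> simp [le_max_left]
    have htake : ∀ j : Nat, (c :: r).take (j + 1 + 1) = c :: r.take (j + 1) := by
      intro j; simp [List.take_cons]
    have hcond : ∀ j : Nat, mask ^^^ pmask ((c :: r).take (j + 1 + 1)) =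
        mask' ^^^ pmask (r.take (j + 1)) := by
      intro j
      rw [htake j]
      have : pmask (c :: r.take (j + 1)) = (1 <<< (c.toNat - 97)) ^^^ pmask (r.take (j + 1)) := by
        simp only [pmask, List.foldl_cons, Nat.zero_xor]
        rw [pmask_shift]
        rfl
      rw [this, hmask', Nat.xor_assoc]
    refine ⟨le_trans hansle ihle, ?_, ?_⟩
    · rcases ihmem with h | ⟨j, hj, hz, hv⟩
      · rw [h, hans']
        split_ifs with hm
        · rcases max_choice ans (k + 1) with hmax | hmax
          · exact Or.inl hmax
          · refine Or.inr ⟨0, by simp, ?_, by omega⟩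
            have hp : pmask ((c :: r).take (0 + 1)) = 1 <<< (c.toNat - 97) := by
              simp [pmask]
            rw [hp]
            exact hm
        · exact Or.inl rfl
      · refine Or.inr ⟨j + 1, by simpa using hj, ?_, by push_cast; omega⟩
        rw [hcond j]; exact hz
    · intro j hj hz
      match j with
      | 0 =>
        have hm : mask' = 0 := by
          have hp : pmask ((c :: r).take (0 + 1)) = 1 <<< (c.toNat - 97) := by
            simp [pmask]
          rw [hp] at hz
          exact hz
        have : (k : Int) + 1 ≤ ans' := by rw [hans']; simp [hm, le_max_right]
        calc k + ((0 : Int) + 1) = k + 1 := by ring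
          _ ≤ ans' := this
          _ ≤ _ := ihle
      | j' + 1 =>
        have hz' : mask' ^^^ pmask (r.take (j' + 1)) = 0 := by rw [← hcond j']; exact hz
        have := ihub j' (by simpa using hj) hz'
        push_cast at this ⊢; omega

-- decomposition of the good substrings of c :: l: those starting at 0 and those inside l
theorem good_cons (c : Char) (l : List Char) (v : Int) :
    GoodUpTo (c :: l) (c :: l).length v ↔
      (∃ j : Nat, j < (c :: l).length ∧ pmask ((c :: l).take (j + 1)) = 0 ∧ v = (j : Int) + 1) ∨
      GoodUpTo l l.length v := by
  constructor
  · rintro ⟨a, b, hab, hb, hm, hv⟩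
    match a with
    | 0 =>
      match b, hab with
      | b' + 1, _ =>
        refine Or.inl ⟨b', by simpa using hb, ?_, by push_cast at hv ⊢; omega⟩
        simpa [pmask] using hm.symm
    | a' + 1 =>
      match b, hab with
      | b' + 1, hab =>
        have ht : ∀ n : Nat, (c :: l).take (n + 1) = c :: l.take n := by
          intro n; simp [List.take_cons]
        rw [ht a', ht b'] at hm
        have hm' : pmask (l.take a') = pmask (l.take b') := by
          have e : ∀ n : Nat, pmask (c :: l.take n)
              = (1 <<< (c.toNat - 97)) ^^^ pmask (l.take n) := by
            intro n; simp only [pmask, List.foldl_cons, Nat.zero_xor]; rw [pmask_shift]; rfl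
          rw [e a', e b'] at hm
          exact xor_left_cancel _ _ _ hm
        exact Or.inr ⟨a', b', by omega, by simpa using hb, hm', by push_cast at hv ⊢; omega⟩
  · rintro (⟨j, hj, hz, hv⟩ | ⟨a, b, hab, hb, hm, hv⟩)
    · exact ⟨0, j + 1, by omega, by simpa using hj, by simpa [pmask] using hz.symm, by
        push_cast; omega⟩
    · refine ⟨a + 1, b + 1, by omega, by simpa using hb, ?_, by push_cast at hv ⊢; omega⟩
      have ht : ∀ n : Nat, (c :: l).take (n + 1) = c :: l.take n := by
        intro n; simp [List.take_cons]
      have e : ∀ n : Nat, pmask (c :: l.take n)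
          = (1 <<< (c.toNat - 97)) ^^^ pmask (l.take n) := by
        intro n; simp only [pmask, List.foldl_cons, Nat.zero_xor]; rw [pmask_shift]; rfl
      rw [ht a, ht b, e a, e b, hm]

theorem outer_spec (l : List Char) (ans : Int) :
    ans ≤ funcAltOuter l ans ∧
    (funcAltOuter l ans = ans ∨ GoodUpTo l l.length (funcAltOuter l ans)) ∧
    (∀ v, GoodUpTo l l.length v → v ≤ funcAltOuter l ans) := by
  induction l generalizing ans with
  | nil =>
    refine ⟨le_refl _, Or.inl rfl, ?_⟩
    rintro v ⟨a, b, hab, hb, _, _⟩; simp at hb; omega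
  | cons c r ih =>
    simp only [funcAltOuter]
    set A1 := funcAltInner (c :: r) 0 0 ans with hA1
    obtain ⟨ile, imem, iub⟩ := inner_spec (c :: r) 0 0 ans
    obtain ⟨ole, omem, oub⟩ := ih A1
    refine ⟨le_trans ile ole, ?_, ?_⟩
    · rcases omem with h | h
      · rw [h]
        rcases imem with h' | ⟨j, hj, hz, hv⟩
        · exact Or.inl h'
        · refine Or.inr ((good_cons c r _).mpr (Or.inl ⟨j, hj, ?_, by omega⟩))
          simpa [Nat.zero_xor] using hz
      · exact Or.inr ((good_cons c r _).mpr (Or.inr h))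
    · intro v hv
      rcases (good_cons c r v).mp hv with ⟨j, hj, hz, hveq⟩ | h
      · have := iub j hj (by simpa [Nat.zero_xor] using hz)
        omega
      · exact oub v h

theorem func_alt_isMax (s : String) : MaxSpec s.toList (func_alt s) := by
  obtain ⟨hle, hmem, hub⟩ := outer_spec s.toList 0
  exact ⟨hle, by simpa [func_alt] using hmem, by simpa [func_alt] using hub⟩

-- ---------- A side ----------

-- the first-occurrence table invariant for A's pos map
def PosInv (L : List Char) (i : Nat) (pos : Nat → Int) : Prop :=
  ∀ m, (pos m = -1 ∧ ∀ k ≤ i, pmask (L.take k) ≠ m) ∨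
       (∃ k : Nat, pos m = (k : Int) ∧ k ≤ i ∧ pmask (L.take k) = m ∧
         ∀ k' ≤ i, pmask (L.take k') = m → k ≤ k')

def AnsInv (L : List Char) (i : Nat) (ans : Int) : Prop :=
  0 ≤ ans ∧ (ans = 0 ∨ GoodUpTo L i ans) ∧ ∀ v, GoodUpTo L i v → v ≤ ans

theorem a_go_spec (L : List Char) (rest : List Char) :
    ∀ (i : Nat) (pos : Nat → Int) (ans : Int) (status : Nat),
    L.drop i = rest → i ≤ L.length →
    status = pmask (L.take i) →
    PosInv L i pos → AnsInv L i ans →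
    MaxSpec L (funcGo rest pos ans status i) := by
  induction rest with
  | nil =>
    intro i pos ans status hdrop hi _ _ hans
    have hlen : i = L.length := by
      have := List.drop_eq_nil_iff.mp hdrop; omega
    subst hlen
    exact ⟨hans.1, hans.2.1, hans.2.2⟩
  | cons c rest ih =>
    intro i pos ans status hdrop hi hstat hpos hans
    have hilt : i < L.length := by
      by_contra h
      rw [List.drop_eq_nil_iff.mpr (by omega)] at hdrop
      exact (List.cons_ne_nil c rest) hdrop.symm
    have hget : L[i] = c := by
      have h0 : (L.drop i)[0]'(by rw [hdrop]; simp) = c := by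
        simp [hdrop]
      rw [List.getElem_drop] at h0
      simpa using h0
    have hdrop' : L.drop (i + 1) = rest := by
      have : L.drop (i + 1) = (L.drop i).drop 1 := by
        rw [List.drop_drop]
      rw [this, hdrop]; simp
    simp only [funcGo]
    set status' := status ^^^ (1 <<< (c.toNat - 97)) with hstat'
    have hstatus' : status' = pmask (L.take (i + 1)) := by
      rw [hstat', hstat, pmask_take_succ L i hilt, hget]
    split_ifs with hcase
    · -- pos[status'] ≠ -1 : earlier prefix with the same mask exists
      rcases hpos status' with ⟨hneg, _⟩ | ⟨k, hk, hki, hkm, hkmin⟩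
      · exact absurd hneg hcase
      refine ih (i + 1) pos _ status' hdrop' (by omega) hstatus' ?_ ?_
      · -- PosInv preserved
        intro m
        rcases hpos m with ⟨hneg, hnone⟩ | ⟨k', hk', hki', hkm', hkmin'⟩
        · refine Or.inl ⟨hneg, ?_⟩
          intro k'' hk'' hmm
          rcases Nat.lt_or_ge k'' (i + 1) with h | h
          · exact hnone k'' (by omega) hmm
          · have : k'' = i + 1 := by omega
            subst this
            rw [← hstatus'] at hmm
            subst hmm
            exact hcase hneg
        · refine Or.inr ⟨k', hk', by omega, hkm', ?_⟩
          intro k'' hk'' hmm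
          rcases Nat.lt_or_ge k'' (i + 1) with h | h
          · exact hkmin' k'' (by omega) hmm
          · omega
      · -- AnsInv with the new ans
        obtain ⟨h0, hmem, hub⟩ := hans
        rw [hk]
        refine ⟨by omega, ?_, ?_⟩
        · rcases max_choice ans (((i : Int) + 1) - (k : Int)) with hmax | hmax
          · rw [hmax]
            rcases hmem with h | ⟨a, b, hab, hb, hm, hv⟩
            · exact Or.inl h
            · exact Or.inr ⟨a, b, hab, by omega, hm, hv⟩
          · rw [hmax]
            exact Or.inr ⟨k, i + 1, by omega, le_refl _, by rw [hkm, hstatus'], by push_cast; ring⟩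
        · rintro v ⟨a, b, hab, hb, hm, hv⟩
          rcases Nat.lt_or_ge b (i + 1) with h | h
          · have := hub v ⟨a, b, hab, by omega, hm, hv⟩
            omega
          · have hb1 : b = i + 1 := by omega
            subst hb1
            have hma : pmask (L.take a) = status' := by rw [hm, hstatus']
            have hle := hkmin a (by omega) hma
            have : v ≤ ((i : Int) + 1) - (k : Int) := by omega
            omega
    · -- pos[status'] = -1 : record first occurrence
      have hneg : pos status' = -1 := by
        by_contra h; exact hcase h
      have hnone : ∀ k ≤ i, pmask (L.take k) ≠ status' := by
        rcases hpos status' with ⟨_, hn⟩ | ⟨k, hk, _, _, _⟩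
        · exact hn
        · rw [hk] at hneg; omega
      refine ih (i + 1) _ ans status' hdrop' (by omega) hstatus' ?_ ?_
      · intro m
        by_cases hm : m = status'
        · subst hm
          refine Or.inr ⟨i + 1, by simp, le_refl _, hstatus'.symm, ?_⟩
          intro k' hk' hmm
          rcases Nat.lt_or_ge k' (i + 1) with h | h
          · exact absurd hmm (hnone k' (by omega))
          · omega
        · rcases hpos m with ⟨hneg', hnone'⟩ | ⟨k', hk', hki', hkm', hkmin'⟩
          · refine Or.inl ⟨by simp [hm, hneg'], ?_⟩
            intro k'' hk'' hmm
            rcases Nat.lt_or_ge k'' (i + 1) with h | h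
            · exact hnone' k'' (by omega) hmm
            · have : k'' = i + 1 := by omega
              subst this
              rw [← hstatus'] at hmm
              exact hm hmm.symm
          · refine Or.inr ⟨k', by simp [hm, hk'], by omega, hkm', ?_⟩
            intro k'' hk'' hmm
            rcases Nat.lt_or_ge k'' (i + 1) with h | h
            · exact hkmin' k'' (by omega) hmm
            · omega
      · obtain ⟨h0, hmem, hub⟩ := hans
        refine ⟨h0, ?_, ?_⟩
        · rcases hmem with h | ⟨a, b, hab, hb, hm, hv⟩
          · exact Or.inl h
          · exact Or.inr ⟨a, b, hab, by omega, hm, hv⟩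
        · rintro v ⟨a, b, hab, hb, hm, hv⟩
          rcases Nat.lt_or_ge b (i + 1) with h | h
          · exact hub v ⟨a, b, hab, by omega, hm, hv⟩
          · have hb1 : b = i + 1 := by omega
            subst hb1
            rw [hstatus'.symm] at hm
            exact absurd hm (hnone a (by omega))

theorem func_isMax (s : String) : MaxSpec s.toList (func s) := by
  refine a_go_spec s.toList s.toList 0 _ 0 0 (by simp) (by simp) (by simp [pmask]) ?_ ?_
  · intro m
    by_cases hm : m = 0
    · subst hm
      refine Or.inr ⟨0, by simp, le_refl _, by simp [pmask], fun k' _ _ => Nat.zero_le _⟩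
    · refine Or.inl ⟨by simp [hm], ?_⟩
      intro k hk hmm
      have : k = 0 := by omega
      subst this
      simp [pmask] at hmm
      exact hm hmm.symm
  · refine ⟨le_refl _, Or.inl rfl, ?_⟩
    rintro v ⟨a, b, hab, hb, _, _⟩; omega

-- ===== VERDICT (by name: the statement is the Claim_ definition above) =====
theorem func_spec : Claim_equal_func := by
  intro s _ _
  unfold Spec_func
  exact isMax_unique s.toList _ _ (func_isMax s) (func_alt_isMax s)
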